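-- pv_equiv track=rewrite | github.com/MHaggis/Package-Inferno | analyzer/src/analyzer.py | domain_allowed
-- ===== SOURCE A (Python) =====
-- def domain_allowed(domain: str, allow_domains: list[str]) -> bool:
--     if not domain:
--         return True
--     domain = domain.lower()
--     for d in allow_domains:
--         if domain == d or domain.endswith('.'+d):
--             return True
--     return False
-- ===== SOURCE B (Python) =====
-- def domain_allowed(domain: str, allow_domains: list[str]) -> bool:
--     if not domain:
--         return True
--     allowed = set(allow_domains)
--     d = domain.lower()
--     if d in allowed:
--         return True
--     for i, ch in enumerate(d):
--         if ch == '.' and d[i + 1:] in allowed: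
--             return True
--     return False
-- ===== Notes on version B (the rewrite author's own statement) =====
-- stated objective: alternative
-- what changed: Instead of scanning every allowed domain and testing equality/endswith, B builds a set of allow_domains once and checks the lowered domain plus each of its dot-boundary suffixes for set membership.
import Mathlib
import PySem

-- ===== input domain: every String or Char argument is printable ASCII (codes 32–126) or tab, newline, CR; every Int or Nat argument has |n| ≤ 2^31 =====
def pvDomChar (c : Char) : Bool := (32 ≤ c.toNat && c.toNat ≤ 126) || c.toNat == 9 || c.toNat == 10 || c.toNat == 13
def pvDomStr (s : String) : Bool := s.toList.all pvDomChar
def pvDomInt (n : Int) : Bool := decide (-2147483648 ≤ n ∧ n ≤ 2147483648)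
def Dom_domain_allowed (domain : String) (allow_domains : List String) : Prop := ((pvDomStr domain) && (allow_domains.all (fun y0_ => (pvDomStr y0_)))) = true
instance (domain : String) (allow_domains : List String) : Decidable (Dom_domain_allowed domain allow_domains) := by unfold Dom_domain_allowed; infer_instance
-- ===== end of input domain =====

-- B replaces A's scan over allow_domains (equality or endswith per entry) by one set built from
-- allow_domains and membership tests for the lowered domain and each of its dot-boundary suffixes.

-- ===== PORT A =====
-- the for-loop over allow_domains: return True on the first match, False after the loop
def aLoop (dl : String) : List String → Bool
  | [] => false
  | d :: rest => if dl == d || PySem.Str.endswith dl ("." ++ d) then true else aLoop dl rest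

def domain_allowed (domain : String) (allow_domains : List String) : Bool :=
  if domain == "" then true
  else aLoop (PySem.Str.lower domain) allow_domains

-- ===== PORT B =====
-- the suffixes of s that start right after a '.' (candidates d[i+1:] for d[i] == '.')
def dotSuffixes : List Char → List (List Char)
  | [] => []
  | c :: rest => if c = '.' then rest :: dotSuffixes rest else dotSuffixes rest

def domain_allowed_alt (domain : String) (allow_domains : List String) : Bool :=
  if domain == "" then true
  else
    let allowed : PySem.Set (List Char) := PySem.Set.ofList (allow_domains.map String.toList)
    let dl := (PySem.Str.lower domain).toList
    (dl :: dotSuffixes dl).any (fun c => PySem.Set.contains allowed c)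

-- ===== PRECONDITION & SPEC =====
def Spec_domain_allowed (domain : String) (allow_domains : List String) (out : Bool) : Prop := out = domain_allowed_alt domain allow_domains
instance (domain : String) (allow_domains : List String) (out : Bool) : Decidable (Spec_domain_allowed domain allow_domains out) := by unfold Spec_domain_allowed; infer_instance

-- ===== CLAIM (what is proved, stated in full; the proofs are below) =====
def Claim_equal_domain_allowed : Prop := ∀ (domain : String) (allow_domains : List String), Dom_domain_allowed domain allow_domains → Spec_domain_allowed domain allow_domains (domain_allowed domain allow_domains)

-- ===== LEMMAS AND PROOFS =====

-- t is a dot-boundary suffix of s exactly when '.'-prefixed t is a suffix of s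
theorem mem_dotSuffixes_iff (s t : List Char) : t ∈ dotSuffixes s ↔ ('.' :: t) <:+ s := by
  induction s with
  | nil => simp [dotSuffixes]
  | cons c rest ih =>
    by_cases hc : c = '.'
    · subst hc
      simp [dotSuffixes, List.suffix_cons_iff, ih]
    · simp only [dotSuffixes, if_neg hc, ih, List.suffix_cons_iff, List.cons.injEq]
      constructor
      · exact Or.inr
      · rintro (⟨h, -⟩ | h)
        · exact absurd h.symm hc
        · exact h

-- A's per-entry test, stated on the candidate list
theorem cond_iff (dl d : String) :
    (dl == d || PySem.Str.endswith dl ("." ++ d)) = true ↔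
      d.toList ∈ (dl.toList :: dotSuffixes dl.toList) := by
  simp only [Bool.or_eq_true, beq_iff_eq, PySem.Str.endswith_eq, PySem.Chars.endswith_iff,
    List.mem_cons, mem_dotSuffixes_iff]
  constructor
  · rintro (rfl | h)
    · exact Or.inl rfl
    · right
      simpa using h
  · rintro (h | h)
    · exact Or.inl (String.toList_inj.mp h).symm
    · right
      simpa using h

-- the loop returns true iff some entry passes the test
theorem aLoop_eq_any (dl : String) (l : List String) :
    aLoop dl l = l.any (fun d => dl == d || PySem.Str.endswith dl ("." ++ d)) := by
  induction l with
  | nil => rfl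
  | cons d rest ih =>
    rw [List.any_cons, ← ih]
    simp only [aLoop]
    by_cases h : (dl == d || PySem.Str.endswith dl ("." ++ d)) = true
    · rw [if_pos h, h, Bool.true_or]
    · rw [if_neg h, eq_false_of_ne_true h, Bool.false_or]

theorem main_eq (dl : String) (l : List String) :
    aLoop dl l = (dl.toList :: dotSuffixes dl.toList).any
      (fun c => PySem.Set.contains (PySem.Set.ofList (l.map String.toList)) c) := by
  rw [aLoop_eq_any]
  rcases hA : l.any (fun d => dl == d || PySem.Str.endswith dl ("." ++ d)) with _ | _
  · rw [eq_comm, Bool.eq_false_iff, Ne, List.any_eq_true]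
    rintro ⟨c, hc, hcont⟩
    rw [PySem.Set.contains_iff, PySem.Set.mem_ofList, List.mem_map] at hcont
    obtain ⟨d, hd, rfl⟩ := hcont
    rw [Bool.eq_false_iff, Ne, List.any_eq_true] at hA
    exact hA ⟨d, hd, (cond_iff dl d).mpr hc⟩
  · rw [List.any_eq_true] at hA
    obtain ⟨d, hd, hcond⟩ := hA
    rw [eq_comm, List.any_eq_true]
    refine ⟨d.toList, (cond_iff dl d).mp hcond, ?_⟩
    rw [PySem.Set.contains_iff, PySem.Set.mem_ofList, List.mem_map]
    exact ⟨d, hd, rfl⟩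

-- ===== VERDICT (by name: the statement is the Claim_ definition above) =====
theorem domain_allowed_spec : Claim_equal_domain_allowed := by
  intro domain allow_domains _
  unfold Spec_domain_allowed domain_allowed domain_allowed_alt
  by_cases h : domain == ""
  · simp [h]
  · simp only [h, if_neg, Bool.false_eq_true, not_false_eq_true]
    exact main_eq _ _
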